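-- pv_equiv track=rewrite | github.com/pypi-data/pypi-mirror-339 | packages/astral-ai/astral_ai-0.2.0.tar.gz/astral_ai-0.2.0/scripts/generate_model_constants.py | extract_provider_specific_models
-- ===== SOURCE A (Python) =====
-- from typing import Dict, List, Set, Any, Tuple
--
-- def extract_provider_specific_models(provider: str, models_data: dict, alias_data: dict) -> List[str]:
--     """Extract all models (IDs and aliases) specific to a provider."""
--     provider_models = []
--
--     # Get model IDs from the provider
--     provider_data = models_data.get('providers', {}).get(provider, {})
--     provider_model_ids = list(provider_data.get('models', {}).keys())
--     provider_models.extend(provider_model_ids)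
--
--     # Get aliases that map to this provider's models
--     for alias, model_list in alias_data.get('aliases', {}).items():
--         # If any model in the list belongs to this provider, add the alias
--         if any(model_id in provider_model_ids for model_id in model_list):
--             provider_models.append(alias)
--
--     return list(set(provider_models))
-- ===== SOURCE B (Python) =====
-- from typing import List
--
-- def extract_provider_specific_models(provider: str, models_data: dict, alias_data: dict) -> List[str]:
--     """Extract all models (IDs and aliases) specific to a provider."""
--     provider_model_ids = list(models_data.get('providers', {}).get(provider, {}).get('models', {}).keys())
--     aliases = alias_data.get('aliases', {})
--     # Reverse index: model id -> aliases that reference it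
--     index = {}
--     for alias, model_list in aliases.items():
--         for model_id in model_list:
--             index.setdefault(model_id, []).append(alias)
--     # Aliases referenced by at least one of this provider's models
--     hit = set()
--     for model_id in provider_model_ids:
--         hit.update(index.get(model_id, []))
--     selected = [alias for alias in aliases if alias in hit]
--     return list(set(provider_model_ids + selected))
-- ===== Notes on version B (the rewrite author's own statement) =====
-- stated objective: alternative
-- what changed: Replaces A's per-alias scan with any(model_id in provider_model_ids) by a reverse index model_id -> aliases built in one pass, a gather of hit aliases over the provider's ids via set union, and an order-preserving filter of the alias keys; Pre_ only excludes association lists whose 'aliases' table has duplicate alias keys, which cannot arise from a Python dict (there A's first-hit vs B's first-key dedup position is accidental).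
import Mathlib
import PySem

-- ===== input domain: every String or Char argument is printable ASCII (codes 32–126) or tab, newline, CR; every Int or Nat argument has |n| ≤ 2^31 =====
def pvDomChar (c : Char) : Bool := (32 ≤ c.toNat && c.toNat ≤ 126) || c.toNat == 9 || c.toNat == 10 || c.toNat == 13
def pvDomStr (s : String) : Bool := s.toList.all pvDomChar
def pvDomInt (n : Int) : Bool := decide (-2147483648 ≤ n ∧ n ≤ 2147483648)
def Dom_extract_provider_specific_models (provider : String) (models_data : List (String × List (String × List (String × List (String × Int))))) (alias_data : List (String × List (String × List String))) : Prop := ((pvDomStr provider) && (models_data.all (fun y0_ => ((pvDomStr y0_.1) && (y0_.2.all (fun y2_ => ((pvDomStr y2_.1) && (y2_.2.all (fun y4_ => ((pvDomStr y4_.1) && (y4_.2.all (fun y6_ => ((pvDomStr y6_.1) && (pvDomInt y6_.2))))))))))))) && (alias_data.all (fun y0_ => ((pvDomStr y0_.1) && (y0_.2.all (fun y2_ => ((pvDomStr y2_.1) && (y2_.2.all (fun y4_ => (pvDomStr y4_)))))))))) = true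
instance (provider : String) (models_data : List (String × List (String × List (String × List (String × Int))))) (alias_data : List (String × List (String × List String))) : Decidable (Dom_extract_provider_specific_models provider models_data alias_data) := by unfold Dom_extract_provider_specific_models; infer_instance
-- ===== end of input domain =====

-- B replaces A's per-alias inner scan of the provider id list by a reverse index (model id -> aliases)
-- built once, a gather over the provider ids, and an order-preserving filter of the alias keys.


-- ===== PORT A =====
def extract_provider_specific_models (provider : String) (models_data : List (String × List (String × List (String × List (String × Int))))) (alias_data : List (String × List (String × List String))) : List String :=
  let provider_data := (PySem.Dict.mk ((PySem.Dict.mk models_data).getD "providers" [])).getD provider []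
  let provider_model_ids := (PySem.Dict.mk ((PySem.Dict.mk provider_data).getD "models" [])).keys
  let provider_models := provider_model_ids
  let provider_models := ((PySem.Dict.mk ((PySem.Dict.mk alias_data).getD "aliases" [])).items).foldl
      (fun acc p => if p.2.any (fun m => provider_model_ids.contains m) then acc ++ [p.1] else acc)
      provider_models
  PySem.Set.ofList provider_models

-- ===== PORT B =====
def extract_provider_specific_models_alt (provider : String) (models_data : List (String × List (String × List (String × List (String × Int))))) (alias_data : List (String × List (String × List String))) : List String :=
  let provider_model_ids := (PySem.Dict.mk ((PySem.Dict.mk ((PySem.Dict.mk ((PySem.Dict.mk models_data).getD "providers" [])).getD provider [])).getD "models" [])).keys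
  let aliases := PySem.Dict.mk ((PySem.Dict.mk alias_data).getD "aliases" [])
  -- index.setdefault(model_id, []).append(alias)  ==  index[model_id] = index.get(model_id, []) + [alias]  == Dict.modify (exact: same key order, new keys appended)
  let index := aliases.items.foldl
      (fun d p => p.2.foldl (fun d m => d.modify m ([] : List String) (fun l => l ++ [p.1])) d)
      PySem.Dict.empty
  let hit := provider_model_ids.foldl (fun s m => PySem.Set.update s (index.getD m [])) PySem.Set.empty
  let selected := aliases.keys.filter (fun a => PySem.Set.contains hit a)
  PySem.Set.ofList (provider_model_ids ++ selected)

-- ===== PRECONDITION & SPEC =====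
-- Pre_ excludes association lists whose 'aliases' table carries duplicate alias keys — impossible for a
-- Python dict — where A's first-hit vs B's first-key dedup position is accidental.
def Pre_extract_provider_specific_models (provider : String) (models_data : List (String × List (String × List (String × List (String × Int))))) (alias_data : List (String × List (String × List String))) : Prop :=
  ((((PySem.Dict.mk alias_data).getD "aliases" []).map Prod.fst).Nodup)
instance (provider : String) (models_data : List (String × List (String × List (String × List (String × Int))))) (alias_data : List (String × List (String × List String))) : Decidable (Pre_extract_provider_specific_models provider models_data alias_data) := by unfold Pre_extract_provider_specific_models; infer_instance

def pvWitness_extract_provider_specific_models : String × (List (String × List (String × List (String × List (String × Int))))) × (List (String × List (String × List String))) :=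
  ("openai",
   [("providers", [("openai", [("models", [("gpt-4", 8)])])])],
   [("aliases", [("best", ["gpt-4"]), ("other", ["claude"])])])

def Spec_extract_provider_specific_models (provider : String) (models_data : List (String × List (String × List (String × List (String × Int))))) (alias_data : List (String × List (String × List String))) (out : List String) : Prop := out = extract_provider_specific_models_alt provider models_data alias_data
instance (provider : String) (models_data : List (String × List (String × List (String × List (String × Int))))) (alias_data : List (String × List (String × List String))) (out : List String) : Decidable (Spec_extract_provider_specific_models provider models_data alias_data out) := by unfold Spec_extract_provider_specific_models; infer_instance

-- ===== CLAIM (what is proved, stated in full; the proofs are below) =====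
def Claim_equal_extract_provider_specific_models : Prop := ∀ (provider : String) (models_data : List (String × List (String × List (String × List (String × Int))))) (alias_data : List (String × List (String × List String))), Dom_extract_provider_specific_models provider models_data alias_data → Pre_extract_provider_specific_models provider models_data alias_data → Spec_extract_provider_specific_models provider models_data alias_data (extract_provider_specific_models provider models_data alias_data)

-- ===== LEMMAS AND PROOFS =====

theorem pv_mem_foldl_update {α β : Type} [BEq β] [LawfulBEq β] (l : List α) (g : α → List β) (s : List β) (a : β) :
    a ∈ l.foldl (fun s x => PySem.Set.update s (g x)) s ↔ a ∈ s ∨ ∃ x ∈ l, a ∈ g x := by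
  induction l generalizing s with
  | nil => simp
  | cons h t ih => simp [List.foldl_cons, ih, PySem.Set.mem_update, or_assoc]

theorem pv_index_foldl_flatMap {κ : Type} [BEq κ] (items : List (κ × List κ)) (d : PySem.Dict κ (List κ)) :
    items.foldl (fun d p => p.2.foldl (fun d m => d.modify m ([] : List κ) (fun l => l ++ [p.1])) d) d
    = (items.flatMap (fun p => p.2.map (fun m => (m, p.1)))).foldl
        (fun d q => d.modify q.1 ([] : List κ) (fun l => l ++ [q.2])) d := by
  induction items generalizing d with
  | nil => simp
  | cons h t ih => rw [List.foldl_cons, List.flatMap_cons, List.foldl_append, List.foldl_map, ih]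

theorem pv_mem_index (items : List (String × List String)) (m a : String) :
    a ∈ (items.foldl (fun d p => p.2.foldl (fun d mm => d.modify mm ([] : List String) (fun l => l ++ [p.1])) d) PySem.Dict.empty).getD m []
    ↔ ∃ p ∈ items, p.1 = a ∧ m ∈ p.2 := by
  rw [pv_index_foldl_flatMap, PySem.Dict.getD_foldl_modify_append]
  simp only [PySem.Dict.getD_empty, List.nil_append, List.mem_map, List.mem_filter, List.mem_flatMap]
  constructor
  · rintro ⟨q, ⟨⟨p, hp, hq⟩, hqm⟩, rfl⟩
    aesop
  · rintro ⟨p, hp, rfl, hm⟩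
    aesop

theorem pv_eq_of_fst_eq {α β : Type} {l : List (α × β)} (h : (l.map Prod.fst).Nodup)
    {p q : α × β} (hp : p ∈ l) (hq : q ∈ l) (hfst : p.1 = q.1) : p = q := by
  have := List.inj_on_of_nodup_map h
  exact this hp hq hfst

theorem pv_main (ids : List String) (al : List (String × List String))
    (hpre : (al.map Prod.fst).Nodup) :
    PySem.Set.ofList (al.foldl (fun acc p => if p.2.any (fun m => ids.contains m) then acc ++ [p.1] else acc) ids)
    = PySem.Set.ofList (ids ++
        (al.map Prod.fst).filter (fun a => PySem.Set.contains
          (ids.foldl (fun s m => PySem.Set.update s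
            ((al.foldl (fun d p => p.2.foldl (fun d mm => d.modify mm ([] : List String) (fun l => l ++ [p.1])) d) PySem.Dict.empty).getD m []))
            PySem.Set.empty) a)) := by
  rw [PySem.List.foldl_append_if]
  congr 1
  rw [List.filter_map]
  refine congrArg (fun t => ids ++ t) (congrArg (List.map Prod.fst) (List.filter_congr ?_))
  intro p hp
  simp only [Function.comp_apply]
  rw [Bool.eq_iff_iff]
  rw [PySem.Set.contains_iff, pv_mem_foldl_update]
  simp only [pv_mem_index, List.any_eq_true]
  constructor
  · rintro ⟨m, hm, hc⟩
    refine Or.inr ⟨m, by simpa using hc, p, hp, rfl, hm⟩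
  · rintro (h | ⟨m, hmids, q, hq, hq1, hmq⟩)
    · simp [PySem.Set.empty] at h
    · have hqp : q = p := pv_eq_of_fst_eq hpre hq hp hq1
      subst hqp
      exact ⟨m, hmq, by simpa using hmids⟩

-- ===== VERDICT (by name: the statement is the Claim_ definition above) =====
theorem extract_provider_specific_models_spec : Claim_equal_extract_provider_specific_models := by
  intro provider models_data alias_data _hdom hpre
  unfold Spec_extract_provider_specific_models extract_provider_specific_models extract_provider_specific_models_alt
  unfold Pre_extract_provider_specific_models at hpre
  exact pv_main _ _ hpre
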